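-- pv_equiv track=rewrite | github.com/snowflakedb/snowpark-python | src/snowflake/snowpark/modin/plugin/_internal/unpivot_utils.py | _can_use_simple_unpivot
-- ===== SOURCE A (Python) =====
-- from collections.abc import Hashable
-- from typing import Optional
--
-- def _can_use_simple_unpivot(
--     ignore_index: Optional[bool], pandas_value_columns: list[Hashable]
-- ) -> bool:
--     """
--     Determines if the simplified unpivot can be used.
--
--     Args:
--         ignore_index: are we supposed to ignore the index
--         pandas_value_columns: a list of value columns to unpivot
--     Returns:
--         True if we can use the simple unpivot, false otherwise
--     """
--     # df.melt defaults to ignoring the index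
--     if ignore_index is False:
--         return False
--     # to use the simple unpivot, all columns should be strings
--     if not all(isinstance(col, str) for col in pandas_value_columns):
--         return False
--     # columns should not have duplicates
--     if len(set(pandas_value_columns)) != len(pandas_value_columns):
--         return False
--     return True
-- ===== SOURCE B (Python) =====
-- def _can_use_simple_unpivot(ignore_index, pandas_value_columns):
--     # df.melt defaults to ignoring the index
--     if ignore_index is False:
--         return False
--     # to use the simple unpivot, all columns should be strings
--     if not all(isinstance(col, str) for col in pandas_value_columns):
--         return False
--     # duplicate detection by sorting: a repeated column must occupy
--     # adjacent positions in sorted order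
--     cols = sorted(pandas_value_columns)
--     return all(x != y for x, y in zip(cols, cols[1:]))
-- ===== Notes on version B (the rewrite author's own statement) =====
-- stated objective: alternative
-- what changed: Replaces A's hash-set cardinality duplicate check (len(set(cols)) != len(cols)) with a sort-based one: sort the columns and scan adjacent pairs for an equal neighbour; no set is built at all.
import Mathlib
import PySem

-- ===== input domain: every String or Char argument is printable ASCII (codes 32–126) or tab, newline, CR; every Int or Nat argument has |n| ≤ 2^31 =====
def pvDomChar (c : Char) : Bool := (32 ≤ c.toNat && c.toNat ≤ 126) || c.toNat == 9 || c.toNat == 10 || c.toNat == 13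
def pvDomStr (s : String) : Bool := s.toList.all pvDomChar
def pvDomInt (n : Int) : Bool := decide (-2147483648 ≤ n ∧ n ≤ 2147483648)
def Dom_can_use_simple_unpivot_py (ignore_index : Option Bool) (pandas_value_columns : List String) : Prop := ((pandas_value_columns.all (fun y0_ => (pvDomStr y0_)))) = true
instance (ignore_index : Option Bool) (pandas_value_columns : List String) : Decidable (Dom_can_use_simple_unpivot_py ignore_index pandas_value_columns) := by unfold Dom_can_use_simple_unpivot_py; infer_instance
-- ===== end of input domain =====

-- B replaces A's hash-set cardinality duplicate check with a sort-then-adjacent-scan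
-- (no set is built); equivalence is exact (objective: alternative).
-- ===== PORT A =====
-- 'isinstance(col, str)' is trivially True under the String typing, ported literally
def can_use_simple_unpivot_py (ignore_index : Option Bool) (pandas_value_columns : List String) : Bool :=
  if ignore_index = some false then false
  else if !(pandas_value_columns.all (fun _col => true)) then false
  else if (PySem.Set.ofList pandas_value_columns).length ≠ pandas_value_columns.length then false
  else true

-- ===== PORT B =====
def can_use_simple_unpivot_py_alt (ignore_index : Option Bool) (pandas_value_columns : List String) : Bool :=
  if ignore_index = some false then false
  else if !(pandas_value_columns.all (fun _col => true)) then false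
  else
    let cols := PySem.List.sorted pandas_value_columns (fun x => x) false
    (cols.zip (PySem.List.slice cols (some 1) none)).all (fun p => p.1 ≠ p.2)

-- ===== PRECONDITION & SPEC =====
def Spec_can_use_simple_unpivot_py (ignore_index : Option Bool) (pandas_value_columns : List String) (out : Bool) : Prop := out = can_use_simple_unpivot_py_alt ignore_index pandas_value_columns
instance (ignore_index : Option Bool) (pandas_value_columns : List String) (out : Bool) : Decidable (Spec_can_use_simple_unpivot_py ignore_index pandas_value_columns out) := by unfold Spec_can_use_simple_unpivot_py; infer_instance

-- ===== CLAIM =====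
def Claim_equal_can_use_simple_unpivot_py : Prop := ∀ (ignore_index : Option Bool) (pandas_value_columns : List String), Dom_can_use_simple_unpivot_py ignore_index pandas_value_columns → Spec_can_use_simple_unpivot_py ignore_index pandas_value_columns (can_use_simple_unpivot_py ignore_index pandas_value_columns)

-- ===== LEMMAS AND PROOFS =====
-- adjacent distinctness of a ≤-sorted list characterises Nodup
theorem pvAdj_iff_nodup (l : List String) (h : l.Pairwise (· ≤ ·)) :
    ((l.zip l.tail).all (fun p => p.1 ≠ p.2) = true) ↔ l.Nodup := by
  induction l with
  | nil => simp
  | cons a t ih =>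
      cases t with
      | nil => simp
      | cons b u =>
          have hpt : (b :: u).Pairwise (· ≤ ·) := h.tail
          have hab : a ≤ b := (List.pairwise_cons.mp h).1 b (by simp)
          have hbu : ∀ x ∈ u, b ≤ x := fun x hx => (List.pairwise_cons.mp hpt).1 x hx
          rw [List.tail_cons] at ih
          rw [List.tail_cons, List.zip_cons_cons, List.all_cons, Bool.and_eq_true,
            decide_eq_true_eq, List.nodup_cons, ih hpt]
          constructor
          · rintro ⟨hne, hrest⟩
            refine ⟨?_, hrest⟩
            intro hmem
            rcases List.mem_cons.mp hmem with rfl | hu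
            · exact hne rfl
            · have : b ≤ a := hbu a hu
              exact hne (le_antisymm hab this)
          · rintro ⟨hna, hnd⟩
            exact ⟨fun hEq => hna (by change a = b at hEq; exact hEq ▸ List.mem_cons_self), hnd⟩

theorem pvOfListLen_iff_nodup (l : List String) :
    (PySem.Set.ofList l).length = l.length ↔ l.Nodup := by
  constructor
  · intro hlen
    have hperm : (PySem.Set.ofList l).Perm l.dedup := by
      refine (List.perm_ext_iff_of_nodup (PySem.Set.nodup_ofList l) l.nodup_dedup).mpr ?_
      intro x; simp [PySem.Set.mem_ofList, List.mem_dedup]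
    have hsub : l.dedup.Sublist l := List.dedup_sublist l
    have : l.dedup = l := hsub.eq_of_length (by rw [← hperm.length_eq, hlen])
    exact List.dedup_eq_self.mp this
  · intro hnd
    rw [PySem.Set.ofList_eq_self_of_nodup l hnd]

-- ===== VERDICT =====
theorem can_use_simple_unpivot_py_spec : Claim_equal_can_use_simple_unpivot_py := by
  intro ii cols _dom
  unfold Spec_can_use_simple_unpivot_py can_use_simple_unpivot_py can_use_simple_unpivot_py_alt
  by_cases hii : ii = some false
  · simp [hii]
  · rw [if_neg hii, if_neg hii]
    have hall : (cols.all fun _col => true) = true := by simp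
    rw [hall]
    simp only [Bool.not_true, Bool.false_eq_true, if_false, PySem.List.slice_from_one]
    generalize hs : PySem.List.sorted cols (fun x => x) false = s
    have hperm : s.Perm cols := hs ▸ PySem.List.sorted_perm ..
    have hpw : s.Pairwise (· ≤ ·) := by
      have := PySem.List.sorted_pairwise (xs := cols) (key := fun x => x)
      rw [hs] at this; exact this
    have hiff : ((s.zip s.tail).all (fun p => p.1 ≠ p.2) = true) ↔ cols.Nodup :=
      (pvAdj_iff_nodup s hpw).trans hperm.nodup_iff
    by_cases hnd : cols.Nodup
    · have h1 : (PySem.Set.ofList cols).length = cols.length :=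
        (pvOfListLen_iff_nodup cols).mpr hnd
      rw [if_neg (fun h => h h1), hiff.mpr hnd]
    · have h1 : (PySem.Set.ofList cols).length ≠ cols.length :=
        fun h => hnd ((pvOfListLen_iff_nodup cols).mp h)
      have h2 : ((s.zip s.tail).all (fun p => p.1 ≠ p.2)) = false := by
        rw [Bool.eq_false_iff]; exact fun h => hnd (hiff.mp h)
      rw [if_pos h1, h2]
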